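-- pv_equiv track=rewrite | github.com/qrichert/cronrunner | cronrunner/cronrunner.py | _split_schedule_and_command
-- ===== SOURCE A (Python) =====
-- def _split_schedule_and_command(line: str) -> tuple[str, str]:
--     """Split schedule and command parts of a job line.
--
--     This is a naive splitter that assumes a schedule consists of
--     either one element if it is a shortcut (e.g., `@daily`), or five
--     elements if not (e.g., `* * * * *`, `0 12 * * *`, etc.).
--
--     Once the appropriate number of elements is consumed (i.e., the
--     schedule is consumed), it considers the rest to be the command
--     itself.
--     """
--     schedule_length: int = 1 if line.startswith("@") else 5
--     schedule_elements: list[str] = []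
--     command_elements: list[str] = []
--     i: int = 0
--     for element in line.split(" "):
--         # Schedule.
--         if i < schedule_length:
--             schedule_elements.append(element)
--             if element:
--                 i += 1
--         # Command.
--         else:
--             command_elements.append(element)
--     schedule: str = " ".join(schedule_elements).strip()
--     command: str = " ".join(command_elements).strip()
--     return schedule, command
-- ===== SOURCE B (Python) =====
-- def _end_of_token(s: str, need: int) -> int:
--     """Index just past the `need`-th maximal run of non-space characters of
--     `s` (len(s) if there are fewer than `need` runs)."""
--     spaces = 0
--     while spaces < len(s) and s[spaces] == " ":
--         spaces += 1
--     run = 0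
--     while spaces + run < len(s) and s[spaces + run] != " ":
--         run += 1
--     if run == 0 or need <= 1:
--         return spaces + run
--     return spaces + run + _end_of_token(s[spaces + run :], need - 1)
--
--
-- def _split_schedule_and_command(line: str) -> tuple[str, str]:
--     """Split schedule and command parts of a job line.
--
--     Computes the cut position directly on the raw string (just past the
--     schedule's last element) and slices, instead of building token lists
--     and re-joining them.
--     """
--     schedule_length = 1 if line.startswith("@") else 5
--     boundary = _end_of_token(line, schedule_length)
--     return line[:boundary].strip(), line[boundary:].strip()
-- ===== Notes on version B (the rewrite author's own statement) =====
-- stated objective: alternative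
-- what changed: Instead of splitting the line into tokens, distributing them over two lists and re-joining with spaces, B computes a single cut index on the raw string (the position just past the schedule's last non-space run, defaulting to len(line)) and returns the two stripped slices.
import Mathlib
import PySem

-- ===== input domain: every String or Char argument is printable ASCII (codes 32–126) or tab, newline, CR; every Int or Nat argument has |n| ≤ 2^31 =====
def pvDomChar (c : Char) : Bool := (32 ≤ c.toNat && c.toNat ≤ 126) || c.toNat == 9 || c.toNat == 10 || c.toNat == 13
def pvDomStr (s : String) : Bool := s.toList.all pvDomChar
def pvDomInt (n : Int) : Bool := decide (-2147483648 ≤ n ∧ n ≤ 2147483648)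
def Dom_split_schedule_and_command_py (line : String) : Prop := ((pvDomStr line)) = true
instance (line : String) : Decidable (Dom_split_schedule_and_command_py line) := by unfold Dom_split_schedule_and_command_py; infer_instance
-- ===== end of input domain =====

-- B computes the cut position directly on the raw line (index just past the schedule's
-- last element) and slices once, instead of A's splitting into tokens, distributing them
-- over two lists and re-joining; objective: simpler/alternative decomposition.

-- ===== PORT A =====
-- A: split on " ", feed tokens to schedule until `schedule_length` non-empty ones are
-- consumed, rest to command; re-join with " " and strip.
def split_schedule_and_command_py (line : String) : String × String :=
  let scheduleLength : Int := if PySem.Str.startswith line "@" then 1 else 5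
  -- line.split(" "): sep is non-empty, so Python never raises; split? is `some` here.
  let res : Int × List String × List String :=
    ((PySem.Str.split? line " ").getD []).foldl
      (fun st element =>
        if st.1 < scheduleLength then
          (st.1 + (if element ≠ "" then 1 else 0), st.2.1 ++ [element], st.2.2)
        else
          (st.1, st.2.1, st.2.2 ++ [element]))
      (0, [], [])
  (PySem.Str.strip (PySem.Str.join " " res.2.1),
   PySem.Str.strip (PySem.Str.join " " res.2.2))

-- ===== PORT B =====
-- _end_of_token(s, need): the two `while` loops count leading spaces and then the length
-- of the first maximal non-space run; recursion on the rest of the string.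
def pvEndOfToken (s : List Char) (need : Int) : Nat :=
  let spaces := (s.takeWhile (· == ' ')).length
  let rest := s.dropWhile (· == ' ')
  let run := (rest.takeWhile (fun c => c != ' ')).length
  if run = 0 ∨ need ≤ 1 then spaces + run
  else spaces + run + pvEndOfToken (rest.dropWhile (fun c => c != ' ')) (need - 1)
termination_by s.length
decreasing_by
  have h1 : (s.takeWhile (· == ' ')).length + (s.dropWhile (· == ' ')).length = s.length := by
    rw [← List.length_append, List.takeWhile_append_dropWhile]
  have h2 : (rest.takeWhile (fun c => c != ' ')).length + (rest.dropWhile (fun c => c != ' ')).length = rest.length := by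
    rw [← List.length_append, List.takeWhile_append_dropWhile]
  simp only [run, rest] at *
  omega

def split_schedule_and_command_py_alt (line : String) : String × String :=
  let scheduleLength : Int := if PySem.Str.startswith line "@" then 1 else 5
  let boundary : Nat := pvEndOfToken line.toList scheduleLength
  (PySem.Str.strip (PySem.Str.slice line none (some (boundary : Int))),
   PySem.Str.strip (PySem.Str.slice line (some (boundary : Int)) none))

-- ===== PRECONDITION & SPEC =====
def Spec_split_schedule_and_command_py (line : String) (out : String × String) : Prop := out = split_schedule_and_command_py_alt line
instance (line : String) (out : String × String) : Decidable (Spec_split_schedule_and_command_py line out) := by unfold Spec_split_schedule_and_command_py; infer_instance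

-- ===== CLAIM (what is proved, stated in full; the proofs are below) =====
def Claim_equal_split_schedule_and_command_py : Prop := ∀ (line : String), Dom_split_schedule_and_command_py line → Spec_split_schedule_and_command_py line (split_schedule_and_command_py line)

-- ===== LEMMAS AND PROOFS =====

-- A simple structural recursion computing exactly Python's line.split(" ")
-- (PySem.Chars.splitOn with the one-char separator [' ']), used to reason about A.
def pvTokens : List Char → List (List Char)
  | [] => [[]]
  | c :: cs => if c = ' ' then [] :: pvTokens cs else (pvTokens cs).modifyHead (c :: ·)

-- What A's fold does to the token list, with `need` = remaining schedule budget.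
def pvConsume (need : Int) : List (List Char) → List (List Char) × List (List Char)
  | [] => ([], [])
  | t :: ts =>
    if 1 ≤ need then
      let p := pvConsume (if t = [] then need else need - 1) ts
      (t :: p.1, p.2)
    else ([], t :: ts)

theorem pvTokens_ne_nil (cs : List Char) : pvTokens cs ≠ [] := by
  induction cs with
  | nil => simp [pvTokens]
  | cons c cs ih =>
    simp only [pvTokens]
    split
    · simp
    · cases h : pvTokens cs with
      | nil => exact absurd h ih
      | cons t ts => simp [List.modifyHead]

theorem pvGo (l : List Char) : ∀ (fuel : Nat) (cur : List Char) (acc : List (List Char)),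
    l.length < fuel →
    PySem.Chars.splitOn.go [' '] fuel l cur acc
      = acc.reverse ++ (pvTokens l).modifyHead (cur.reverse ++ ·) := by
  induction l with
  | nil =>
    intro fuel cur acc h
    cases fuel with
    | zero => omega
    | succ f => rw [PySem.Chars.splitOn.go] <;> simp [pvTokens]
  | cons c rest ih =>
    intro fuel cur acc h
    cases fuel with
    | zero => omega
    | succ f =>
      rw [PySem.Chars.splitOn.go]
      obtain ⟨t, ts, ht⟩ : ∃ t ts, pvTokens rest = t :: ts := by
        cases h' : pvTokens rest with
        | nil => exact absurd h' (pvTokens_ne_nil rest)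
        | cons t ts => exact ⟨t, ts, rfl⟩
      by_cases hc : c = ' '
      · subst hc
        rw [if_pos (by simp [List.isPrefixOf])]
        have hdrop : List.drop [' '].length (' ' :: rest) = rest := rfl
        rw [hdrop, ih f [] (cur.reverse :: acc) (by simp at h; omega)]
        simp [pvTokens, ht, List.modifyHead]
      · have hpre : [' '].isPrefixOf (c :: rest) = false := by
          simp [List.isPrefixOf]
          intro h'; exact absurd h'.symm hc
        rw [if_neg (by simp [hpre])]
        rw [ih f (c :: cur) acc (by simp at h; omega)]
        simp [pvTokens, hc, ht, List.modifyHead]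

theorem pvSplitOn_eq_tokens (cs : List Char) :
    PySem.Chars.splitOn cs [' '] = pvTokens cs := by
  unfold PySem.Chars.splitOn
  rw [pvGo cs (cs.length + 1) [] [] (by omega)]
  cases h : pvTokens cs with
  | nil => exact absurd h (pvTokens_ne_nil cs)
  | cons t ts => simp [List.modifyHead]

theorem pvJoin_nil : PySem.Chars.join [' '] [] = [] := by
  simp [PySem.Chars.join, List.intercalate]

theorem pvJoin_singleton (t : List Char) : PySem.Chars.join [' '] [t] = t := by
  simp [PySem.Chars.join, List.intercalate]

theorem pvJoin_cons (t : List Char) (ts : List (List Char)) (h : ts ≠ []) :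
    PySem.Chars.join [' '] (t :: ts) = t ++ ' ' :: PySem.Chars.join [' '] ts := by
  cases ts with
  | nil => exact absurd rfl h
  | cons u us => simp [PySem.Chars.join, List.intercalate]

theorem pvJoin_tokens (cs : List Char) : PySem.Chars.join [' '] (pvTokens cs) = cs := by
  induction cs with
  | nil => simp [pvTokens]
  | cons c rest ih =>
    obtain ⟨t, ts, ht⟩ : ∃ t ts, pvTokens rest = t :: ts := by
      cases h' : pvTokens rest with
      | nil => exact absurd h' (pvTokens_ne_nil rest)
      | cons t ts => exact ⟨t, ts, rfl⟩
    by_cases hc : c = ' '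
    · subst hc
      rw [pvTokens, if_pos rfl, pvJoin_cons _ _ (pvTokens_ne_nil rest), ih]
      simp
    · rw [pvTokens, if_neg hc, ht]
      simp only [List.modifyHead]
      rw [ht] at ih
      cases ts with
      | nil =>
        rw [pvJoin_singleton]
        rw [pvJoin_singleton] at ih
        rw [ih]
      | cons u us =>
        rw [pvJoin_cons _ _ (by simp)]
        rw [pvJoin_cons _ _ (by simp)] at ih
        simp only [List.cons_append]
        rw [ih]

theorem pvStrip_space_cons (xs : List Char) :
    PySem.Chars.strip (' ' :: xs) = PySem.Chars.strip xs := by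
  simp [PySem.Chars.strip, PySem.Chars.lstrip, PySem.Chars.isspace]


-- ---- A's fold, reduced to the Char-list level ----

def pvListStep (L : Int) (st : Int × List (List Char) × List (List Char)) (e : List Char) :
    Int × List (List Char) × List (List Char) :=
  if st.1 < L then (st.1 + (if e ≠ [] then 1 else 0), st.2.1 ++ [e], st.2.2)
  else (st.1, st.2.1, st.2.2 ++ [e])

theorem pvToList_ne_empty (e : String) : (e ≠ "") ↔ (e.toList ≠ []) :=
  not_congr (by rw [← String.toList_inj]; simp)

theorem pvStage1 (L : Int) (strs : List String) : ∀ (st : Int × List String × List String),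
    (let r := strs.foldl
        (fun st element =>
          if st.1 < L then
            (st.1 + (if element ≠ "" then 1 else 0), st.2.1 ++ [element], st.2.2)
          else
            (st.1, st.2.1, st.2.2 ++ [element])) st
     ((r.1 : Int), r.2.1.map String.toList, r.2.2.map String.toList))
      = (strs.map String.toList).foldl (pvListStep L)
          (st.1, st.2.1.map String.toList, st.2.2.map String.toList) := by
  induction strs with
  | nil => intro st; rfl
  | cons e rest ih =>
    intro st
    simp only [List.foldl_cons, List.map_cons]
    rw [ih]
    congr 1
    by_cases hlt : st.1 < L
    · simp only [pvListStep, hlt, if_true]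
      by_cases he : e = ""
      · subst he; simp
      · simp [he, (pvToList_ne_empty e).mp he]
    · simp [pvListStep, hlt]

theorem pvConsume_nonpos (need : Int) (ts : List (List Char)) (h : need ≤ 0) :
    pvConsume need ts = ([], ts) := by
  cases ts with
  | nil => simp [pvConsume]
  | cons t ts => simp [pvConsume]; omega

theorem pvStage2 (L : Int) (ts : List (List Char)) : ∀ (i : Int) (sa ca : List (List Char)),
    (ts.foldl (pvListStep L) (i, sa, ca)).2
      = (sa ++ (pvConsume (L - i) ts).1, ca ++ (pvConsume (L - i) ts).2) := by
  induction ts with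
  | nil => intro i sa ca; simp [pvConsume]
  | cons t ts ih =>
    intro i sa ca
    simp only [List.foldl_cons]
    by_cases hlt : i < L
    · rw [show pvListStep L (i, sa, ca) t
          = (i + (if t ≠ [] then 1 else 0), sa ++ [t], ca) by simp [pvListStep, hlt]]
      rw [ih]
      have h1 : (1:Int) ≤ L - i := by omega
      by_cases ht : t = []
      · simp [pvConsume, h1, ht]
      · have : L - (i + 1) = L - i - 1 := by omega
        simp [pvConsume, h1, ht, this]
    · rw [show pvListStep L (i, sa, ca) t = (i, sa, ca ++ [t]) by simp [pvListStep, hlt]]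
      rw [ih]
      rw [pvConsume_nonpos _ _ (by omega), pvConsume_nonpos _ _ (by omega)]
      simp

-- ---- pvTokens over the spaces / run / rest decomposition ----

theorem pvTokens_all_space (l xs : List Char) (h : ∀ c ∈ l, c = ' ') :
    pvTokens (l ++ xs) = List.replicate l.length [] ++ pvTokens xs := by
  induction l with
  | nil => simp
  | cons c l ih =>
    have hc : c = ' ' := h c (by simp)
    simp only [List.cons_append, pvTokens, if_pos hc, List.length_cons, List.replicate_succ]
    rw [ih (fun c hc => h c (by simp [hc]))]

theorem pvTokens_run_nil (r : List Char) (h : ∀ c ∈ r, ¬c = ' ') : pvTokens r = [r] := by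
  induction r with
  | nil => simp [pvTokens]
  | cons c r ih =>
    simp only [pvTokens, if_neg (h c (by simp))]
    rw [ih (fun c hc => h c (by simp [hc]))]
    simp [List.modifyHead]

theorem pvTokens_run_space (r xs : List Char) (h : ∀ c ∈ r, ¬c = ' ') :
    pvTokens (r ++ ' ' :: xs) = r :: pvTokens xs := by
  induction r with
  | nil => simp [pvTokens]
  | cons c r ih =>
    simp only [List.cons_append, pvTokens, if_neg (h c (by simp))]
    rw [ih (fun c hc => h c (by simp [hc]))]
    simp [List.modifyHead]

theorem pvConsume_replicate (k : Nat) (need : Int) (ts : List (List Char)) (h : 1 ≤ need) :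
    pvConsume need (List.replicate k [] ++ ts)
      = (List.replicate k [] ++ (pvConsume need ts).1, (pvConsume need ts).2) := by
  induction k with
  | zero => simp
  | succ k ih =>
    simp only [List.replicate_succ, List.cons_append, pvConsume, if_pos h]
    simp [ih]

theorem pvJoin_replicate (k : Nat) (ts : List (List Char)) (h : ts ≠ []) :
    PySem.Chars.join [' '] (List.replicate k [] ++ ts)
      = List.replicate k ' ' ++ PySem.Chars.join [' '] ts := by
  induction k with
  | zero => simp
  | succ k ih =>
    simp only [List.replicate_succ, List.cons_append]
    rw [pvJoin_cons _ _ (by simp [h]), ih]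
    simp

theorem pvJoin_head_append (r : List Char) (ts : List (List Char)) :
    PySem.Chars.join [' '] (r :: ts) = r ++ PySem.Chars.join [' '] ([] :: ts) := by
  cases ts with
  | nil => rw [pvJoin_singleton, pvJoin_singleton]; simp
  | cons u us =>
    rw [pvJoin_cons r (u :: us) (by simp), pvJoin_cons ([]) (u :: us) (by simp)]
    simp

-- one-step unfolding of pvEndOfToken (well-founded recursion)
theorem pvEndOfToken_eq (s : List Char) (need : Int) :
    pvEndOfToken s need =
      if ((s.dropWhile (· == ' ')).takeWhile (fun c => c != ' ')).length = 0 ∨ need ≤ 1 then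
        (s.takeWhile (· == ' ')).length
          + ((s.dropWhile (· == ' ')).takeWhile (fun c => c != ' ')).length
      else
        (s.takeWhile (· == ' ')).length
          + ((s.dropWhile (· == ' ')).takeWhile (fun c => c != ' ')).length
          + pvEndOfToken ((s.dropWhile (· == ' ')).dropWhile (fun c => c != ' ')) (need - 1) := by
  rw [pvEndOfToken]

theorem pvEndOfToken_nil (need : Int) : pvEndOfToken [] need = 0 := by
  rw [pvEndOfToken_eq]; simp

-- ---- the main correspondence ----

theorem pvTake_decomp (sp r r2 : List Char) (m : Nat) :
    (sp ++ (r ++ r2)).take (sp.length + r.length + m) = sp ++ (r ++ r2.take m) := by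
  rw [List.take_append, List.take_of_length_le (by omega),
      show sp.length + r.length + m - sp.length = r.length + m by omega,
      List.take_append, List.take_of_length_le (by omega),
      show r.length + m - r.length = m by omega]

theorem pvDrop_decomp (sp r r2 : List Char) (m : Nat) :
    (sp ++ (r ++ r2)).drop (sp.length + r.length + m) = r2.drop m := by
  rw [List.drop_append, List.drop_eq_nil_of_le (by omega),
      show sp.length + r.length + m - sp.length = r.length + m by omega,
      List.drop_append, List.drop_eq_nil_of_le (by omega),
      show r.length + m - r.length = m by omega, List.nil_append, List.nil_append]

theorem pvMain : ∀ (n : Nat) (cs : List Char), cs.length ≤ n → ∀ (need : Int), 1 ≤ need →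
    PySem.Chars.join [' '] (pvConsume need (pvTokens cs)).1 = cs.take (pvEndOfToken cs need)
  ∧ PySem.Chars.strip (PySem.Chars.join [' '] (pvConsume need (pvTokens cs)).2)
      = PySem.Chars.strip (cs.drop (pvEndOfToken cs need)) := by
  intro n
  induction n with
  | zero =>
    intro cs hlen need hneed
    have hnil : cs = [] := List.eq_nil_of_length_eq_zero (by omega)
    subst hnil
    constructor
    · simp [pvTokens, pvConsume, hneed, pvEndOfToken_nil]
    · simp [pvTokens, pvConsume, hneed, pvEndOfToken_nil]
  | succ n ihn =>
    intro cs hlen need hneed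
    -- decomposition: leading spaces, first non-space run, remainder
    set sp := cs.takeWhile (· == ' ') with hsp_def
    set rest := cs.dropWhile (· == ' ') with hrest_def
    set run := rest.takeWhile (fun c => c != ' ') with hrun_def
    set rest2 := rest.dropWhile (fun c => c != ' ') with hrest2_def
    have hcs : sp ++ rest = cs := List.takeWhile_append_dropWhile
    have hrest_split : run ++ rest2 = rest := List.takeWhile_append_dropWhile
    have hsp_space : ∀ c ∈ sp, c = ' ' := by
      intro c hc
      have := List.mem_takeWhile_imp hc
      simpa using this
    have hrun_ns : ∀ c ∈ run, ¬c = ' ' := by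
      intro c hc
      have := List.mem_takeWhile_imp hc
      simpa using this
    have hsp_rep : sp = List.replicate sp.length ' ' := List.eq_replicate_of_mem hsp_space
    have hE := pvEndOfToken_eq cs need
    rw [← hsp_def, ← hrest_def, ← hrun_def, ← hrest2_def] at hE
    cases hr : run with
    | nil =>
      -- the whole line is spaces (rest is empty)
      have hrest_nil : rest = [] := by
        by_contra hne
        have h1 : List.dropWhile (fun x => x == ' ') cs ≠ [] := by rw [← hrest_def]; exact hne
        have hx := List.head_dropWhile_not (fun x => x == ' ') h1
        have hrne : run ≠ [] := by
          rw [hrun_def, hrest_def]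
          cases hd : List.dropWhile (fun x => x == ' ') cs with
          | nil => exact absurd hd h1
          | cons y yt =>
            simp only [hd, List.head_cons] at hx
            have hy : ¬y = ' ' := by simpa using hx
            simp [hy]
        exact hrne hr
      have hcs_sp : sp = cs := by rw [← hcs, hrest_nil, List.append_nil]
      have hEval : pvEndOfToken cs need = cs.length := by
        rw [hE, hr, if_pos (by simp)]
        simp [← hcs_sp]
      have htok : pvTokens cs = List.replicate sp.length [] ++ [[]] := by
        rw [← hcs_sp, show pvTokens sp = pvTokens (sp ++ []) by simp,
            pvTokens_all_space sp [] hsp_space]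
        rfl
      have hcons : pvConsume need (pvTokens cs)
          = (List.replicate sp.length [] ++ [[]], []) := by
        rw [htok, pvConsume_replicate _ _ _ hneed]
        simp [pvConsume, hneed]
      rw [hcons, hEval]
      constructor
      · rw [pvJoin_replicate _ _ (by simp), pvJoin_singleton, List.take_length, List.append_nil]
        rw [← hcs_sp]
        conv_rhs => rw [hsp_rep]
      · rw [List.drop_length, pvJoin_nil]
    | cons c0 rtail =>
      have hrun_ne : run ≠ [] := by simp [hr]
      rw [← hr] at *
      have hrun_pos : 0 < run.length := List.length_pos_of_ne_nil hrun_ne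
      have hlen_cs : sp.length + run.length + rest2.length = cs.length := by
        rw [← hcs, ← hrest_split]; simp [Nat.add_assoc]
      cases hr2 : rest2 with
      | nil =>
        -- the run reaches the end of the line
        have htok : pvTokens cs = List.replicate sp.length [] ++ [run] := by
          rw [← hcs, ← hrest_split, hr2, List.append_nil,
              pvTokens_all_space sp run hsp_space, pvTokens_run_nil run hrun_ns]
        have hcons : pvConsume need (pvTokens cs)
            = (List.replicate sp.length [] ++ [run], []) := by
          rw [htok, pvConsume_replicate _ _ _ hneed]
          simp [pvConsume, hneed]
        have hr2len : rest2.length = 0 := by rw [hr2]; rfl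
        have hEval : pvEndOfToken cs need = cs.length := by
          rw [hE]
          split_ifs with hif
          · omega
          · rw [hr2, pvEndOfToken_nil]; omega
        rw [hcons, hEval]
        constructor
        · rw [pvJoin_replicate _ _ (by simp), pvJoin_singleton, List.take_length]
          rw [← hcs, ← hrest_split, hr2, List.append_nil]
          conv_rhs => rw [hsp_rep]
        · rw [List.drop_length, pvJoin_nil]
      | cons x xs =>
        -- the run is followed by a space: rest2 = ' ' :: xs
        have hx_space : x = ' ' := by
          have h1 : List.dropWhile (fun c => c != ' ') rest ≠ [] := by
            rw [← hrest2_def, hr2]; simp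
          have hx := List.head_dropWhile_not (fun c => c != ' ') h1
          have h2 : List.dropWhile (fun c => c != ' ') rest = x :: xs := by
            rw [← hrest2_def]; exact hr2
          simp only [h2, List.head_cons] at hx
          simpa using hx
        subst hx_space
        have htok : pvTokens cs = List.replicate sp.length [] ++ run :: pvTokens xs := by
          rw [← hcs, ← hrest_split, hr2,
              pvTokens_all_space sp _ hsp_space, pvTokens_run_space run xs hrun_ns]
        have hcons : pvConsume need (pvTokens cs)
            = (List.replicate sp.length [] ++ run :: (pvConsume (need - 1) (pvTokens xs)).1,
               (pvConsume (need - 1) (pvTokens xs)).2) := by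
          rw [htok, pvConsume_replicate _ _ _ hneed]
          simp [pvConsume, hneed, hrun_ne]
        rw [hcons]
        by_cases hneed1 : need ≤ 1
        · -- need = 1: the schedule ends right here
          have hEval : pvEndOfToken cs need = sp.length + run.length := by
            rw [hE, if_pos (Or.inr hneed1)]
          have hp : pvConsume (need - 1) (pvTokens xs) = ([], pvTokens xs) :=
            pvConsume_nonpos _ _ (by omega)
          rw [hEval, hp]
          have htake : cs.take (sp.length + run.length) = sp ++ run := by
            rw [← hcs, ← hrest_split,
                show sp.length + run.length = sp.length + run.length + 0 by omega,
                pvTake_decomp]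
            simp
          have hdrop : cs.drop (sp.length + run.length) = rest2 := by
            rw [← hcs, ← hrest_split,
                show sp.length + run.length = sp.length + run.length + 0 by omega,
                pvDrop_decomp]
            simp
          constructor
          · rw [pvJoin_replicate _ _ (by simp), pvJoin_singleton, htake]
            conv_rhs => rw [hsp_rep]
          · rw [hdrop, hr2, pvJoin_tokens, pvStrip_space_cons]
        · -- need ≥ 2: recurse on the rest of the line
          have hlen2 : rest2.length ≤ n := by omega
          have hIH := ihn rest2 hlen2 (need - 1) (by omega)
          have htok2 : pvTokens rest2 = [] :: pvTokens xs := by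
            rw [hr2]; simp [pvTokens]
          rw [htok2] at hIH
          have hp2 : pvConsume (need - 1) ([] :: pvTokens xs)
              = ([] :: (pvConsume (need - 1) (pvTokens xs)).1,
                 (pvConsume (need - 1) (pvTokens xs)).2) := by
            simp [pvConsume, show (1:Int) ≤ need - 1 by omega]
          rw [hp2] at hIH
          obtain ⟨hIH1, hIH2⟩ := hIH
          have hEval : pvEndOfToken cs need
              = sp.length + run.length + pvEndOfToken rest2 (need - 1) := by
            rw [hE, if_neg (not_or.mpr ⟨by omega, by omega⟩)]
          rw [hEval]
          have htake : cs.take (sp.length + run.length + pvEndOfToken rest2 (need - 1))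
              = sp ++ (run ++ rest2.take (pvEndOfToken rest2 (need - 1))) := by
            rw [← hcs, ← hrest_split, pvTake_decomp]
          have hdrop : cs.drop (sp.length + run.length + pvEndOfToken rest2 (need - 1))
              = rest2.drop (pvEndOfToken rest2 (need - 1)) := by
            rw [← hcs, ← hrest_split, pvDrop_decomp]
          constructor
          · rw [pvJoin_replicate _ _ (by simp), pvJoin_head_append, hIH1, htake]
            conv_rhs => rw [hsp_rep]
          · rw [hdrop, hIH2]

-- ===== VERDICT (by name: the statement is the Claim_ definition above) =====
theorem split_schedule_and_command_py_spec : Claim_equal_split_schedule_and_command_py := by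
  unfold Claim_equal_split_schedule_and_command_py
  intro line _hdom
  unfold Spec_split_schedule_and_command_py
  simp only [split_schedule_and_command_py, split_schedule_and_command_py_alt]
  set L := (if PySem.Str.startswith line "@" then (1 : Int) else 5) with hL_def
  have hL : (1 : Int) ≤ L := by rw [hL_def]; split_ifs <;> norm_num
  have hsep : (" " : String).toList = [' '] := by decide
  have hsplit := PySem.Str.split?_map line " "
  rw [hsep] at hsplit
  cases hs : PySem.Str.split? line " " with
  | none => rw [hs] at hsplit; simp [PySem.Chars.split?] at hsplit
  | some strs =>
    rw [hs] at hsplit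
    simp only [Option.map_some, PySem.Chars.split?, List.isEmpty_cons, if_false,
      Bool.false_eq_true, Option.some.injEq] at hsplit
    have htok : strs.map String.toList = pvTokens line.toList := by
      rw [hsplit, pvSplitOn_eq_tokens]
    have hfold := pvStage1 L strs (0, [], [])
    simp only [List.map_nil] at hfold
    have h21 := congrArg (fun t => t.2.1) hfold
    have h22 := congrArg (fun t => t.2.2) hfold
    simp only at h21 h22
    rw [htok] at h21 h22
    have hst2 := pvStage2 L (pvTokens line.toList) 0 [] []
    simp only [List.nil_append, sub_zero] at hst2
    have hmain := pvMain line.toList.length line.toList le_rfl L hL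
    simp only [Option.getD_some]
    rw [Prod.mk.injEq]
    constructor
    · apply String.toList_inj.mp
      simp only [PySem.Str.toList_strip, PySem.Str.toList_join, PySem.Str.toList_slice,
        PySem.Chars.slice_eq_listSlice, hsep, PySem.List.slice_to_natCast]
      rw [h21, show ((pvTokens line.toList).foldl (pvListStep L) (0, [], [])).2.1
            = (((pvTokens line.toList).foldl (pvListStep L) (0, [], [])).2).1 from rfl,
          hst2, hmain.1]
    · apply String.toList_inj.mp
      simp only [PySem.Str.toList_strip, PySem.Str.toList_join, PySem.Str.toList_slice,
        PySem.Chars.slice_eq_listSlice, hsep, PySem.List.slice_from_natCast]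
      rw [h22, show ((pvTokens line.toList).foldl (pvListStep L) (0, [], [])).2.2
            = (((pvTokens line.toList).foldl (pvListStep L) (0, [], [])).2).2 from rfl,
          hst2, hmain.2]
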